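-- pv_equiv track=rewrite | github.com/JamesCraster/ProjectEuler | 18.py | sumPath
-- ===== SOURCE A (Python) =====
-- def sumPath(L,binaryList):
--    row = 0
--    column = 0
--    summation = L[row][column]
--    for x in binaryList:
--       row += 1
--       if x == 1:
--          column += 1
--       summation += L[row][column]
--
--    return summation
-- ===== SOURCE B (Python) =====
-- def sumPath(L, binaryList):
--     # table-first decomposition: build the column index per row, then sum in a second pass
--     cols = [0]
--     c = 0
--     for x in binaryList:
--         if x == 1:
--             c += 1
--         cols.append(c)
--     return sum(L[i][ci] for i, ci in enumerate(cols))
-- ===== Notes on version B (the rewrite author's own statement) =====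
-- stated objective: alternative
-- what changed: B first builds the table of column indices (a prefix count of 1-directions) and then sums the selected triangle entries in a separate enumerate pass, instead of threading row/column/summation through one loop.
import Mathlib
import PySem

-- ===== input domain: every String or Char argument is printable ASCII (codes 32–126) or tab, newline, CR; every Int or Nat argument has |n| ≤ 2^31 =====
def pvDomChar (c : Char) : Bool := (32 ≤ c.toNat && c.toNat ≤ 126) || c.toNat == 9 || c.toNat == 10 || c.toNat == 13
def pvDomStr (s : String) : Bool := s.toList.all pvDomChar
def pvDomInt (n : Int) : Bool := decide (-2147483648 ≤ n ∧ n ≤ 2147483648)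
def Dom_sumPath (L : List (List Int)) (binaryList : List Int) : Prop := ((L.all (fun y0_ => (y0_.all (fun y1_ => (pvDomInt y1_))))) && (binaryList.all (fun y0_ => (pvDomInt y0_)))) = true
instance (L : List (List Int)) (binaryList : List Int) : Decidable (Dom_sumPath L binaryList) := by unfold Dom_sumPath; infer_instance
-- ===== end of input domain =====

-- B builds the column-index table first, then sums in a second pass (alternative decomposition, same cost).

-- ===== PORT A =====
-- L[row][column], defaulting to 0 only where Python would raise IndexError (excluded by Pre_).
def pvCell (L : List (List Int)) (i c : Int) : Int :=
  ((PySem.List.pyGet? L i).bind (fun r => PySem.List.pyGet? r c)).getD 0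

def sumPath (L : List (List Int)) (binaryList : List Int) : Int :=
  (binaryList.foldl
    (fun (st : Int × Int × Int) x =>
      let row := st.1 + 1
      let column := if x = 1 then st.2.1 + 1 else st.2.1
      (row, column, st.2.2 + pvCell L row column))
    (0, 0, pvCell L 0 0)).2.2

-- ===== PORT B =====
def sumPath_alt (L : List (List Int)) (binaryList : List Int) : Int :=
  let cols := (binaryList.foldl
    (fun (st : List Int × Int) x =>
      let c := if x = 1 then st.2 + 1 else st.2
      (st.1 ++ [c], c)) ([0], 0)).1
  (PySem.List.enumerate cols 0).foldl (fun s p => s + pvCell L p.1 p.2) 0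

-- ===== PRECONDITION & SPEC =====
-- Pre_: every visited cell exists — row i is present and the prefix count of 1-directions is a valid column; exactly where Python A returns without IndexError.
def Pre_sumPath (L : List (List Int)) (binaryList : List Int) : Prop :=
  ∀ i : Nat, i < binaryList.length + 1 →
    i < L.length ∧ ((binaryList.take i).countP (fun x => x = 1)) < (L.getD i []).length
instance (L : List (List Int)) (binaryList : List Int) : Decidable (Pre_sumPath L binaryList) := by unfold Pre_sumPath; infer_instance

def pvWitness_sumPath : List (List Int) × List Int := ([[3], [7, 4], [2, 4, 6]], [1, 0])

def Spec_sumPath (L : List (List Int)) (binaryList : List Int) (out : Int) : Prop := out = sumPath_alt L binaryList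
instance (L : List (List Int)) (binaryList : List Int) (out : Int) : Decidable (Spec_sumPath L binaryList out) := by unfold Spec_sumPath; infer_instance

-- ===== CLAIM (what is proved, stated in full; the proofs are below) =====
def Claim_equal_sumPath : Prop := ∀ (L : List (List Int)) (binaryList : List Int), Dom_sumPath L binaryList → Pre_sumPath L binaryList → Spec_sumPath L binaryList (sumPath L binaryList)

-- ===== LEMMAS AND PROOFS =====

-- the remaining path sum after position (r, c)
def pvRef (L : List (List Int)) (r c : Int) : List Int → Int
  | [] => 0
  | x :: t =>
    let c' := if x = 1 then c + 1 else c
    pvCell L (r + 1) c' + pvRef L (r + 1) c' t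

-- the column table produced after position with current column c
def pvTail (c : Int) : List Int → List Int
  | [] => []
  | x :: t =>
    let c' := if x = 1 then c + 1 else c
    c' :: pvTail c' t

-- sum of cells addressed by a column list starting at row i
def pvESum (L : List (List Int)) (i : Int) : List Int → Int
  | [] => 0
  | c :: t => pvCell L i c + pvESum L (i + 1) t

theorem pvA_loop (L : List (List Int)) (bs : List Int) :
    ∀ (r c s : Int),
      (bs.foldl
        (fun (st : Int × Int × Int) x =>
          let row := st.1 + 1
          let column := if x = 1 then st.2.1 + 1 else st.2.1
          (row, column, st.2.2 + pvCell L row column)) (r, c, s)).2.2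
      = s + pvRef L r c bs := by
  induction bs with
  | nil => intro r c s; simp [pvRef]
  | cons x t ih =>
    intro r c s
    simp only [List.foldl_cons, pvRef, ih]
    ring

theorem pvB_cols (bs : List Int) :
    ∀ (acc : List Int) (c : Int),
      (bs.foldl
        (fun (st : List Int × Int) x =>
          let c := if x = 1 then st.2 + 1 else st.2
          (st.1 ++ [c], c)) (acc, c)).1
      = acc ++ pvTail c bs := by
  induction bs with
  | nil => intro acc c; simp [pvTail]
  | cons x t ih =>
    intro acc c
    simp only [List.foldl_cons, pvTail, ih, List.append_assoc, List.singleton_append]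

theorem pvB_esum (L : List (List Int)) (cs : List Int) :
    ∀ (i s : Int),
      (PySem.List.enumerate cs i).foldl (fun s p => s + pvCell L p.1 p.2) s
      = s + pvESum L i cs := by
  induction cs with
  | nil => intro i s; simp [PySem.List.enumerate_nil, pvESum]
  | cons c t ih =>
    intro i s
    rw [PySem.List.enumerate_cons, List.foldl_cons, ih]
    simp [pvESum]; ring

theorem pvTie (L : List (List Int)) (bs : List Int) :
    ∀ (r c : Int), pvESum L (r + 1) (pvTail c bs) = pvRef L r c bs := by
  induction bs with
  | nil => intro r c; simp [pvTail, pvRef, pvESum]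
  | cons x t ih =>
    intro r c
    simp only [pvTail, pvRef, pvESum, ih]

-- ===== VERDICT (by name: the statement is the Claim_ definition above) =====
theorem sumPath_spec : Claim_equal_sumPath := by
  intro L bs _ _
  unfold Spec_sumPath sumPath sumPath_alt
  rw [pvA_loop]
  rw [pvB_cols, List.singleton_append, pvB_esum]
  simp only [pvESum, zero_add]
  have := pvTie L bs 0 0
  rw [zero_add] at this
  rw [this]
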